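-- pv_equiv track=rewrite | github.com/SilverBoi78/path_builder | game_logic.py | dfs_vertical
-- ===== SOURCE A (Python) =====
-- def dfs_vertical(grid, visited, row, col, player):
--     if row == 9:
--         return True
--
--     visited[row][col] = True
--
--     directions = [(0, 1), (0, -1), (1, 0), (-1, 0)]
--
--     for dr, dc in directions:
--         new_row, new_col = row + dr, col + dc
--
--         if (0 <= new_row < 10 and 0 <= new_col < 10 and
--             not visited[new_row][new_col] and
--             grid[new_row][new_col] == player):
--
--             if dfs_vertical(grid, visited, new_row, new_col, player):
--                 return True
--
--     return False
-- ===== SOURCE B (Python) =====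
-- def dfs_vertical(grid, visited, row, col, player):
--     stack = [(row, col, None)]
--     while stack:
--         r, c, rem = stack.pop()
--         if rem is None:
--             # first time this cell is handled
--             if r == 9:
--                 return True
--             visited[r][c] = True
--             stack.append((r, c, [(0, 1), (0, -1), (1, 0), (-1, 0)]))
--         elif not rem:
--             pass  # frame exhausted: it stays popped
--         else:
--             (dr, dc), rest = rem[0], rem[1:]
--             stack.append((r, c, rest))
--             nr, nc = r + dr, c + dc
--             if (0 <= nr < 10 and 0 <= nc < 10 and
--                     not visited[nr][nc] and grid[nr][nc] == player):
--                 stack.append((nr, nc, None))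
--     return False
-- ===== Notes on version B (the rewrite author's own statement) =====
-- stated objective: alternative
-- what changed: A's recursive DFS is replaced by an iterative loop over an explicit stack of (row, col, remaining-directions) frames, eliminating recursion (same search order and same in-place marking of visited).
import Mathlib
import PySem

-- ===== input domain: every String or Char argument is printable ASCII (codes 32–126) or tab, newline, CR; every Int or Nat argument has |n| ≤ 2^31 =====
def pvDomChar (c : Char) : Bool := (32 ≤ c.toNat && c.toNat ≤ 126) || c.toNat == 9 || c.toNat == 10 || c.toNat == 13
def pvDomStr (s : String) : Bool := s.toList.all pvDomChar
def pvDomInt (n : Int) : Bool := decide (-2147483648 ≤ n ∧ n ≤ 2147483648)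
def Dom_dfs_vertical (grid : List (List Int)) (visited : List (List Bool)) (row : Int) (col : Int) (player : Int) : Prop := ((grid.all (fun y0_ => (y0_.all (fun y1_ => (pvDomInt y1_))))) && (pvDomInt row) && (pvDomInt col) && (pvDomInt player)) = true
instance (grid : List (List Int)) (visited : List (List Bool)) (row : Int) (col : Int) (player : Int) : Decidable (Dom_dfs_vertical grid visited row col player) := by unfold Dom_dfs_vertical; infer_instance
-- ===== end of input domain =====

-- B replaces A's recursion by an iterative loop over an explicit stack of (row, col, remaining-directions)
-- frames — same search order, no recursion; equivalence is proved for the RETURN value (in Python both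
-- A and B mutate `visited` in place, marking the same cells in the same order).

-- ===== PORT A =====
-- helpers shared by the two ports: Python list indexing (negative index wraps by the list's length)
-- for element access and in-place mark; exact on the in-range indices Pre_ guarantees.
def pvIdx (n : Nat) (i : Int) : Nat := if i < 0 then (i + n).toNat else i.toNat
def pvMark (v : List (List Bool)) (r c : Int) : List (List Bool) :=
  v.modify (pvIdx v.length r) (fun rw => rw.set (pvIdx rw.length c) true)
def pvGetB (v : List (List Bool)) (r c : Int) : Bool :=
  (v.getD (pvIdx v.length r) []).getD (pvIdx (v.getD (pvIdx v.length r) []).length c) false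
def pvGetI (g : List (List Int)) (r c : Int) : Int :=
  (g.getD (pvIdx g.length r) []).getD (pvIdx (g.getD (pvIdx g.length r) []).length c) 0

-- A's recursion, fuel-guarded for totality (fuel 250 is proved sufficient on Pre_: the measure
-- 2·(#false cells) + 1 strictly decreases into every recursive call); goA is A's `for` loop over
-- the direction list, threading the mutated `visited` and the early `return True`.
mutual
def dfsA (g : List (List Int)) (p : Int) : Nat → List (List Bool) → Int → Int → Option (Bool × List (List Bool))
  | 0, _, _, _ => none
  | fuel+1, v, r, c =>
    if r = 9 then some (true, v)
    else goA g p fuel [(0,1),(0,-1),(1,0),(-1,0)] (pvMark v r c) r c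
  termination_by f v r c => (f, 0)
def goA (g : List (List Int)) (p : Int) : Nat → List (Int × Int) → List (List Bool) → Int → Int → Option (Bool × List (List Bool))
  | _, [], v, _, _ => some (false, v)
  | fuel, (dr,dc)::ds, v, r, c =>
    if 0 ≤ r+dr ∧ r+dr < 10 ∧ 0 ≤ c+dc ∧ c+dc < 10 ∧ pvGetB v (r+dr) (c+dc) = false ∧ pvGetI g (r+dr) (c+dc) = p then
      match dfsA g p fuel v (r+dr) (c+dc) with
      | none => none
      | some (true, v') => some (true, v')
      | some (false, v') => goA g p fuel ds v' r c
    else goA g p fuel ds v r c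
  termination_by f ds v r c => (f, ds.length + 1)
end

def dfs_vertical (grid : List (List Int)) (visited : List (List Bool)) (row : Int) (col : Int) (player : Int) : Bool :=
  match dfsA grid player 250 visited row col with
  | some (b, _) => b
  | none => false

-- ===== PORT B =====
-- B's explicit-stack loop: a frame is (row, col, none) before first handling, (row, col, some rem)
-- afterwards with rem the directions still to try.  One runB step = one iteration of Source B's while
-- loop; fuel-guarded for totality (pvFuelB steps are proved sufficient on Pre_).
def runB (g : List (List Int)) (p : Int) : Nat → List (Int × Int × Option (List (Int × Int))) → List (List Bool) → Option Bool
  | 0, _, _ => none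
  | _+1, [], _ => some false
  | fuel+1, (r, c, none) :: rest, v =>
    if r = 9 then some true
    else runB g p fuel ((r, c, some [(0,1),(0,-1),(1,0),(-1,0)]) :: rest) (pvMark v r c)
  | fuel+1, (_, _, some []) :: rest, v => runB g p fuel rest v
  | fuel+1, (r, c, some ((dr,dc)::ds)) :: rest, v =>
    if 0 ≤ r+dr ∧ r+dr < 10 ∧ 0 ≤ c+dc ∧ c+dc < 10 ∧ pvGetB v (r+dr) (c+dc) = false ∧ pvGetI g (r+dr) (c+dc) = p then
      runB g p fuel ((r+dr, c+dc, none) :: (r, c, some ds) :: rest) v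
    else runB g p fuel ((r, c, some ds) :: rest) v

-- step budget for runB (fuel guard only; proved sufficient on Pre_)
def pvCostD : Nat → Nat
  | 0 => 0
  | f+1 => 4 * pvCostD f + 6
def pvFuelB : Nat := pvCostD 250 + 1

def dfs_vertical_alt (grid : List (List Int)) (visited : List (List Bool)) (row : Int) (col : Int) (player : Int) : Bool :=
  match runB grid player pvFuelB [(row, col, none)] visited with
  | some b => b
  | none => false

-- ===== PRECONDITION & SPEC =====
-- helper predicates Pre_ is built from: pvWrapOk = the start is a valid Python index into visited
-- (negative wraps); pvDead = each of the four moves immediately fails A's test (out of the 0..9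
-- bounds, or the neighbour cell exists and is already visited / is the freshly marked start /
-- belongs to another player), so A marks the start and returns False reading nothing else.
def pvWrapOk (visited : List (List Bool)) (row col : Int) : Prop :=
  -(visited.length : Int) ≤ row ∧ row < (visited.length : Int) ∧
  -(((visited.getD (pvIdx visited.length row) []).length : Int)) ≤ col ∧
  col < ((visited.getD (pvIdx visited.length row) []).length : Int)
def pvDead (grid : List (List Int)) (visited : List (List Bool)) (row col player : Int) : Prop :=
  ∀ d ∈ [((0:Int),(1:Int)), (0,-1), (1,0), (-1,0)],
    (0 ≤ row + d.1 ∧ row + d.1 < 10 ∧ 0 ≤ col + d.2 ∧ col + d.2 < 10) →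
    ((row + d.1).toNat = pvIdx visited.length row ∧
       (col + d.2).toNat = pvIdx (visited.getD (pvIdx visited.length row) []).length col) ∨
    ((row + d.1).toNat < visited.length ∧
      (col + d.2).toNat < (visited.getD (row + d.1).toNat []).length ∧
      ((visited.getD (row + d.1).toNat []).getD (col + d.2).toNat false = true ∨
        ((row + d.1).toNat < grid.length ∧
          (col + d.2).toNat < (grid.getD (row + d.1).toNat []).length ∧
          (grid.getD (row + d.1).toNat []).getD (col + d.2).toNat 0 ≠ player)))
-- Pre_ admits the immediate row==9 success, every full 10x10 board with an in-range (possibly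
-- negative, wrapping) start, and every start whose four moves all immediately fail A's test.  It
-- excludes the inputs on which A's deeper search walks off a smaller/ragged board or an
-- out-of-range start and raises IndexError, and the rare small boards where such a deeper search
-- happens to stay in range and return (A and B agree there too, but 'the recursion stays on the
-- board' is not a closed-form condition on the input).
def Pre_dfs_vertical (grid : List (List Int)) (visited : List (List Bool)) (row : Int) (col : Int) (player : Int) : Prop :=
  row = 9 ∨
  (grid.length = 10 ∧ (∀ gr ∈ grid, gr.length = 10) ∧ visited.length = 10 ∧
    (∀ vr ∈ visited, vr.length = 10) ∧ -10 ≤ row ∧ row < 10 ∧ -10 ≤ col ∧ col < 10) ∨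
  (row ≠ 9 ∧ pvWrapOk visited row col ∧ pvDead grid visited row col player)
instance (grid : List (List Int)) (visited : List (List Bool)) (row : Int) (col : Int) (player : Int) : Decidable (Pre_dfs_vertical grid visited row col player) := by unfold Pre_dfs_vertical pvWrapOk pvDead; infer_instance

def pvWitness_dfs_vertical : List (List Int) × List (List Bool) × Int × Int × Int :=
  (List.replicate 10 (List.replicate 10 0), List.replicate 10 (List.replicate 10 false), 0, 0, 1)

def Spec_dfs_vertical (grid : List (List Int)) (visited : List (List Bool)) (row : Int) (col : Int) (player : Int) (out : Bool) : Prop := out = dfs_vertical_alt grid visited row col player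
instance (grid : List (List Int)) (visited : List (List Bool)) (row : Int) (col : Int) (player : Int) (out : Bool) : Decidable (Spec_dfs_vertical grid visited row col player out) := by unfold Spec_dfs_vertical; infer_instance

-- ===== CLAIM (what is proved, stated in full; the proofs are below) =====
def Claim_equal_dfs_vertical : Prop := ∀ (grid : List (List Int)) (visited : List (List Bool)) (row : Int) (col : Int) (player : Int), Dom_dfs_vertical grid visited row col player → Pre_dfs_vertical grid visited row col player → Spec_dfs_vertical grid visited row col player (dfs_vertical grid visited row col player)

-- ===== LEMMAS AND PROOFS =====

-- number of unvisited cells (A's termination measure) and the 10×10 shape invariant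
def pvCF (v : List (List Bool)) : Nat := (v.map (fun rw => rw.count false)).sum
def pvShape10 (v : List (List Bool)) : Prop := v.length = 10 ∧ ∀ rw ∈ v, rw.length = 10
def pvCostG (f n : Nat) : Nat := n * (1 + pvCostD f) + 1

lemma count_false_set_le (l : List Bool) (i : Nat) : (l.set i true).count false ≤ l.count false := by
  induction l generalizing i with
  | nil => simp
  | cons x xs ih =>
    cases i with
    | zero => cases x <;> simp
    | succ j => cases x <;> simp <;> exact ih j

lemma count_false_set_lt (l : List Bool) (i : Nat) (hi : i < l.length) (hf : l.getD i true = false) :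
    (l.set i true).count false < l.count false := by
  induction l generalizing i with
  | nil => simp at hi
  | cons x xs ih =>
    cases i with
    | zero => simp_all
    | succ j =>
      simp only [List.set_cons_succ, List.count_cons]
      have := ih j (by simpa using hi) (by simpa using hf)
      omega

lemma pvCF_mark_le (v : List (List Bool)) (r c : Int) : pvCF (pvMark v r c) ≤ pvCF v := by
  unfold pvMark pvCF
  generalize pvIdx v.length r = i
  induction v generalizing i with
  | nil => simp
  | cons x xs ih =>
    cases i with
    | zero => simpa using Nat.add_le_add_right (count_false_set_le x (pvIdx x.length c)) ((xs.map (fun rw => rw.count false)).sum)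
    | succ j =>
      simp only [List.modify_succ_cons, List.map_cons, List.sum_cons]
      exact Nat.add_le_add_left (ih j) _

lemma pvCF_modify_lt (v : List (List Bool)) (i : Nat) (c : Int) (hi : i < v.length)
    (hj : pvIdx (v.getD i []).length c < (v.getD i []).length)
    (hf : (v.getD i []).getD (pvIdx (v.getD i []).length c) false = false) :
    pvCF (v.modify i (fun rw => rw.set (pvIdx rw.length c) true)) < pvCF v := by
  unfold pvCF
  induction v generalizing i with
  | nil => simp at hi
  | cons x xs ih =>
    cases i with
    | zero =>
      simp only [List.getD_cons_zero] at hj hf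
      have hx : (x.set (pvIdx x.length c) true).count false < x.count false := by
        apply count_false_set_lt x (pvIdx x.length c) hj
        rw [List.getD_eq_getElem x true hj, ← List.getD_eq_getElem x false hj]
        exact hf
      simpa using Nat.add_lt_add_right hx ((xs.map (fun rw => rw.count false)).sum)
    | succ j =>
      simp only [List.modify_succ_cons, List.map_cons, List.sum_cons]
      have := ih j (by simpa using hi) (by simpa using hj) (by simpa using hf)
      omega

lemma pvCF_mark_lt (v : List (List Bool)) (r c : Int)
    (hr : pvIdx v.length r < v.length)
    (hc : pvIdx (v.getD (pvIdx v.length r) []).length c < (v.getD (pvIdx v.length r) []).length)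
    (hf : pvGetB v r c = false) : pvCF (pvMark v r c) < pvCF v := by
  unfold pvMark
  exact pvCF_modify_lt v (pvIdx v.length r) c hr hc hf

lemma pvShape10_mark (v : List (List Bool)) (r c : Int) (h : pvShape10 v) : pvShape10 (pvMark v r c) := by
  obtain ⟨h1, h2⟩ := h
  refine ⟨by simp [pvMark, h1], ?_⟩
  intro rw hrw
  rw [List.mem_iff_getElem?] at hrw
  obtain ⟨i, hi⟩ := hrw
  unfold pvMark at hi
  rw [List.getElem?_modify] at hi
  cases hx : v[i]? with
  | none => rw [hx] at hi; simp at hi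
  | some x =>
    have hx2 : x.length = 10 := h2 x (List.mem_of_getElem? hx)
    rw [hx] at hi
    simp only [Option.map_eq_map, Option.map_some] at hi
    split at hi <;> simp only [Option.some.injEq] at hi <;> subst hi <;> simp [hx2]

lemma pvCF_le_100 (v : List (List Bool)) (h : pvShape10 v) : pvCF v ≤ 100 := by
  obtain ⟨h1, h2⟩ := h
  have := List.sum_le_card_nsmul (v.map (fun rw => rw.count false)) 10 (by
    intro x hx
    obtain ⟨rw, hrw, hx⟩ := List.mem_map.1 hx
    subst hx
    exact le_trans (List.count_le_length) (le_of_eq (h2 rw hrw)))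
  simpa [pvCF, h1] using this

def OutD (g : List (List Int)) (p : Int) (f : Nat) : Prop :=
  ∀ v r c b v', dfsA g p f v r c = some (b, v') → pvCF v' ≤ pvCF v ∧ (pvShape10 v → pvShape10 v')
def OutG (g : List (List Int)) (p : Int) (f : Nat) : Prop :=
  ∀ ds v r c b v', goA g p f ds v r c = some (b, v') → pvCF v' ≤ pvCF v ∧ (pvShape10 v → pvShape10 v')

lemma outG_of (g : List (List Int)) (p : Int) (f : Nat) (hD : OutD g p f) : OutG g p f := by
  intro ds
  induction ds with
  | nil =>
    intro v r c b v' h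
    rw [goA] at h
    simp only [Option.some.injEq, Prod.mk.injEq] at h
    obtain ⟨-, rfl⟩ := h
    exact ⟨le_refl _, fun x => x⟩
  | cons d ds ih =>
    obtain ⟨dr, dc⟩ := d
    intro v r c b v' h
    rw [goA] at h
    split at h
    · cases hA : dfsA g p f v (r+dr) (c+dc) with
      | none => rw [hA] at h; exact absurd h (by simp)
      | some x =>
        obtain ⟨cb, cv⟩ := x
        rw [hA] at h
        obtain ⟨hle, hsh⟩ := hD v (r+dr) (c+dc) cb cv hA
        cases cb with
        | true =>
          simp only [Option.some.injEq, Prod.mk.injEq] at h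
          obtain ⟨-, rfl⟩ := h
          exact ⟨hle, hsh⟩
        | false =>
          obtain ⟨hle2, hsh2⟩ := ih cv r c b v' h
          exact ⟨le_trans hle2 hle, fun hs => hsh2 (hsh hs)⟩
    · exact ih v r c b v' h

lemma outD_all (g : List (List Int)) (p : Int) : ∀ f, OutD g p f := by
  intro f
  induction f with
  | zero => intro v r c b v' h; rw [dfsA] at h; exact absurd h (by simp)
  | succ f ih =>
    intro v r c b v' h
    rw [dfsA] at h
    split at h
    · simp only [Option.some.injEq, Prod.mk.injEq] at h
      obtain ⟨-, rfl⟩ := h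
      exact ⟨le_refl _, fun x => x⟩
    · obtain ⟨hle, hsh⟩ := outG_of g p f ih _ _ _ _ _ _ h
      exact ⟨le_trans hle (pvCF_mark_le v r c), fun hs => hsh (pvShape10_mark v r c hs)⟩

def SuffD (g : List (List Int)) (p : Int) (f : Nat) : Prop :=
  ∀ v r c, pvShape10 v → 0 ≤ r → r < 10 → 0 ≤ c → c < 10 →
    2 * pvCF v + (if pvGetB v r c = true then 1 else 0) < f → dfsA g p f v r c ≠ none
def SuffG (g : List (List Int)) (p : Int) (f : Nat) : Prop :=
  ∀ ds v r c, pvShape10 v → 2 * pvCF v + 1 ≤ f → goA g p f ds v r c ≠ none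

lemma suffG_of (g : List (List Int)) (p : Int) (f : Nat) (hD : SuffD g p f) : SuffG g p f := by
  intro ds
  induction ds with
  | nil => intro v r c hs hf; rw [goA]; simp
  | cons d ds ih =>
    obtain ⟨dr, dc⟩ := d
    intro v r c hs hf
    rw [goA]
    split
    · rename_i hcond
      obtain ⟨h1, h2, h3, h4, h5, h6⟩ := hcond
      have hne : dfsA g p f v (r+dr) (c+dc) ≠ none := by
        apply hD v (r+dr) (c+dc) hs h1 h2 h3 h4
        simp [h5]
        omega
      cases hA : dfsA g p f v (r+dr) (c+dc) with
      | none => exact absurd hA hne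
      | some x =>
        obtain ⟨cb, cv⟩ := x
        cases cb with
        | true => simp
        | false =>
          show goA g p f ds cv r c ≠ none
          obtain ⟨hle, hsh⟩ := outD_all g p f v (r+dr) (c+dc) false cv hA
          exact ih cv r c (hsh hs) (by omega)
    · exact ih v r c hs hf

lemma pvIdx_nonneg (n : Nat) (i : Int) (h : 0 ≤ i) : pvIdx n i = i.toNat := by
  unfold pvIdx; rw [if_neg (by omega)]

lemma suffD_all (g : List (List Int)) (p : Int) : ∀ f, SuffD g p f := by
  intro f
  induction f with
  | zero => intro v r c _ _ _ _ _ hlt; omega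
  | succ f ih =>
    intro v r c hs hr0 hr10 hc0 hc10 hlt
    rw [dfsA]
    split
    · simp
    · rename_i hne9
      apply suffG_of g p f ih _ _ r c (pvShape10_mark v r c hs)
      have hrn : pvIdx v.length r < v.length := by
        rw [pvIdx_nonneg _ _ hr0, hs.1]; omega
      have hmem : v.getD (pvIdx v.length r) [] ∈ v := by
        rw [List.getD_eq_getElem v [] hrn]
        exact List.getElem_mem hrn
      have hcn : pvIdx (v.getD (pvIdx v.length r) []).length c < (v.getD (pvIdx v.length r) []).length := by
        rw [pvIdx_nonneg _ _ hc0, hs.2 _ hmem]; omega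
      cases hgb : pvGetB v r c with
      | true => simp [hgb] at hlt
                have := pvCF_mark_le v r c
                omega
      | false =>
        have := pvCF_mark_lt v r c hrn hcn hgb
        simp [hgb] at hlt
        omega

lemma dfsA_ne_none (g : List (List Int)) (p : Int) (v : List (List Bool)) (r c : Int)
    (hs : pvShape10 v) : dfsA g p 250 v r c ≠ none := by
  rw [show (250:Nat) = 249+1 from rfl, dfsA]
  split
  · simp
  · apply suffG_of g p 249 (suffD_all g p 249) _ _ r c (pvShape10_mark v r c hs)
    have h1 := pvCF_mark_le v r c
    have h2 := pvCF_le_100 v hs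
    omega

lemma runB_mono (g : List (List Int)) (p : Int) :
    ∀ (k m : Nat) (st : List (Int × Int × Option (List (Int × Int)))) (v : List (List Bool)) (res : Bool),
      runB g p k st v = some res → runB g p (m + k) st v = some res := by
  intro k
  induction k with
  | zero => intro m st v res h; rw [runB] at h; exact absurd h (by simp)
  | succ j ih =>
    intro m st v res h
    rw [show m + (j+1) = (m+j)+1 from by omega]
    cases st with
    | nil => rw [runB] at h ⊢; exact h
    | cons fr rest =>
      obtain ⟨r, c, o⟩ := fr
      cases o with
      | none =>
        rw [runB] at h ⊢
        split at h
        · rename_i h9; rw [if_pos h9]; exact h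
        · rename_i h9; rw [if_neg h9]; exact ih m _ _ _ h
      | some ds =>
        cases ds with
        | nil => rw [runB] at h ⊢; exact ih m _ _ _ h
        | cons d ds =>
          obtain ⟨dr, dc⟩ := d
          rw [runB] at h ⊢
          split at h
          · rename_i hcond; rw [if_pos hcond]; exact ih m _ _ _ h
          · rename_i hcond; rw [if_neg hcond]; exact ih m _ _ _ h

def SimD (g : List (List Int)) (p : Int) (f : Nat) : Prop :=
  ∀ v r c b v', dfsA g p f v r c = some (b, v') → ∀ rest k,
    (b = true → runB g p (pvCostD f + k) ((r, c, none) :: rest) v = some true) ∧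
    (b = false → ∀ res, runB g p k rest v' = some res →
      runB g p (pvCostD f + k) ((r, c, none) :: rest) v = some res)
def SimG (g : List (List Int)) (p : Int) (f : Nat) : Prop :=
  ∀ ds v r c b v', goA g p f ds v r c = some (b, v') → ∀ rest k,
    (b = true → runB g p (pvCostG f ds.length + k) ((r, c, some ds) :: rest) v = some true) ∧
    (b = false → ∀ res, runB g p k rest v' = some res →
      runB g p (pvCostG f ds.length + k) ((r, c, some ds) :: rest) v = some res)

lemma simG_of (g : List (List Int)) (p : Int) (f : Nat) (hD : SimD g p f) : SimG g p f := by
  intro ds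
  induction ds with
  | nil =>
    intro v r c b v' h rest k
    rw [goA] at h
    simp only [Option.some.injEq, Prod.mk.injEq] at h
    obtain ⟨hb, rfl⟩ := h
    subst hb
    constructor
    · intro hbt; exact absurd hbt (by simp)
    · intro _ res hres
      have hc : pvCostG f ([] : List (Int × Int)).length + k = k + 1 := by simp [pvCostG]; omega
      rw [hc, runB]
      exact hres
  | cons d ds ih =>
    obtain ⟨dr, dc⟩ := d
    intro v r c b v' h rest k
    rw [goA] at h
    split at h
    · rename_i hcond
      have hc : pvCostG f ((dr,dc)::ds).length + k
          = (pvCostD f + (pvCostG f ds.length + k)) + 1 := by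
        simp [pvCostG]; ring
      cases hA : dfsA g p f v (r+dr) (c+dc) with
      | none => rw [hA] at h; simp at h
      | some x =>
        obtain ⟨cb, cv⟩ := x
        rw [hA] at h
        cases cb with
        | true =>
          simp only [Option.some.injEq, Prod.mk.injEq] at h
          obtain ⟨hb, rfl⟩ := h
          subst hb
          constructor
          · intro _
            rw [hc, runB, if_pos hcond]
            exact (hD _ _ _ _ _ hA _ _).1 rfl
          · intro hbf; exact absurd hbf (by simp)
        | false =>
          constructor
          · intro hbt
            rw [hc, runB, if_pos hcond]
            exact (hD _ _ _ _ _ hA _ _).2 rfl true ((ih _ _ _ _ _ h _ _).1 hbt)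
          · intro hbf res hres
            rw [hc, runB, if_pos hcond]
            exact (hD _ _ _ _ _ hA _ _).2 rfl res ((ih _ _ _ _ _ h _ _).2 hbf res hres)
    · rename_i hcond
      have hc : pvCostG f ((dr,dc)::ds).length + k
          = (pvCostG f ds.length + (pvCostD f + k)) + 1 := by
        simp [pvCostG]; ring
      constructor
      · intro hbt
        rw [hc, runB, if_neg hcond]
        exact (ih _ _ _ _ _ h _ _).1 hbt
      · intro hbf res hres
        rw [hc, runB, if_neg hcond]
        exact (ih _ _ _ _ _ h _ _).2 hbf res (runB_mono g p k (pvCostD f) rest v' res hres)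

lemma simD_all (g : List (List Int)) (p : Int) : ∀ f, SimD g p f := by
  intro f
  induction f with
  | zero => intro v r c b v' h; rw [dfsA] at h; simp at h
  | succ f ih =>
    intro v r c b v' h rest k
    rw [dfsA] at h
    split at h
    · rename_i h9
      simp only [Option.some.injEq, Prod.mk.injEq] at h
      obtain ⟨hb, rfl⟩ := h
      subst hb
      constructor
      · intro _
        have hc : pvCostD (f+1) + k = (4 * pvCostD f + 5 + k) + 1 := by
          simp [pvCostD]; omega
        rw [hc, runB, if_pos h9]
      · intro hbf; exact absurd hbf (by simp)
    · rename_i h9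
      have hc : pvCostD (f+1) + k = (pvCostG f 4 + k) + 1 := by
        simp [pvCostD, pvCostG]; ring
      constructor
      · intro hbt
        rw [hc, runB, if_neg h9]
        exact (simG_of g p f ih _ _ _ _ _ _ h rest k).1 hbt
      · intro hbf res hres
        rw [hc, runB, if_neg h9]
        exact (simG_of g p f ih _ _ _ _ _ _ h rest k).2 hbf res hres

-- the dead-end start case: reading helpers at nonnegative coordinates, the marked array
lemma pvIdx_lt (n : Nat) (i : Int) (h1 : -(n:Int) ≤ i) (h2 : i < (n:Int)) : pvIdx n i < n := by
  unfold pvIdx; split <;> omega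

lemma pvGetB_eq_getD (v : List (List Bool)) (nr nc : Int) (h0 : 0 ≤ nr) (h1 : 0 ≤ nc) :
    pvGetB v nr nc = (v.getD nr.toNat []).getD nc.toNat false := by
  unfold pvGetB
  rw [pvIdx_nonneg _ _ h0, pvIdx_nonneg _ _ h1]

lemma pvGetI_eq_getD (g : List (List Int)) (nr nc : Int) (h0 : 0 ≤ nr) (h1 : 0 ≤ nc) :
    pvGetI g nr nc = (g.getD nr.toNat []).getD nc.toNat 0 := by
  unfold pvGetI
  rw [pvIdx_nonneg _ _ h0, pvIdx_nonneg _ _ h1]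

lemma getD_mark (v : List (List Bool)) (row col : Int) (k : Nat) :
    (pvMark v row col).getD k [] =
      if k = pvIdx v.length row then
        (v.getD k []).set (pvIdx (v.getD k []).length col) true
      else v.getD k [] := by
  unfold pvMark
  cases hx : v[k]? with
  | none =>
    have hgd : v.getD k [] = [] := by rw [List.getD_eq_getElem?_getD, hx]; rfl
    have hlm : (v.modify (pvIdx v.length row) (fun rw => rw.set (pvIdx rw.length col) true)).getD k [] = [] := by
      rw [List.getD_eq_getElem?_getD, List.getElem?_modify, hx]
      simp
    rw [hlm, hgd]
    simp
  | some x =>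
    have hgd : v.getD k [] = x := by rw [List.getD_eq_getElem?_getD, hx]; rfl
    have hlm : (v.modify (pvIdx v.length row) (fun rw => rw.set (pvIdx rw.length col) true)).getD k []
        = if pvIdx v.length row = k then x.set (pvIdx x.length col) true else x := by
      rw [List.getD_eq_getElem?_getD, List.getElem?_modify, hx]
      split <;> simp
    rw [hlm, hgd]
    by_cases h : k = pvIdx v.length row
    · rw [if_pos h.symm, if_pos h]
    · rw [if_neg (fun hk => h hk.symm), if_neg h]

lemma pvGetB_mark_eq (v : List (List Bool)) (row col : Int) (hw : pvWrapOk v row col)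
    (nr nc : Int) (h0 : 0 ≤ nr) (h1 : 0 ≤ nc)
    (hr : nr.toNat = pvIdx v.length row)
    (hc : nc.toNat = pvIdx (v.getD (pvIdx v.length row) []).length col) :
    pvGetB (pvMark v row col) nr nc = true := by
  obtain ⟨hw1, hw2, hw3, hw4⟩ := hw
  have hjl : pvIdx (v.getD (pvIdx v.length row) []).length col
      < (v.getD (pvIdx v.length row) []).length := pvIdx_lt _ _ hw3 hw4
  rw [pvGetB_eq_getD _ _ _ h0 h1, getD_mark, if_pos hr, hr, hc]
  rw [List.getD_eq_getElem?_getD, List.getElem?_set_self (by simpa using hjl)]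
  simp

lemma pvGetB_mark_ne (v : List (List Bool)) (row col : Int)
    (nr nc : Int) (h0 : 0 ≤ nr) (h1 : 0 ≤ nc)
    (hne : nr.toNat ≠ pvIdx v.length row ∨
      nc.toNat ≠ pvIdx (v.getD (pvIdx v.length row) []).length col) :
    pvGetB (pvMark v row col) nr nc = pvGetB v nr nc := by
  rw [pvGetB_eq_getD _ _ _ h0 h1, pvGetB_eq_getD _ _ _ h0 h1, getD_mark]
  rcases hne with hne | hne
  · rw [if_neg hne]
  · split
    · rename_i hk
      rw [← hk] at hne
      rw [List.getD_eq_getElem?_getD, List.getElem?_set_ne (fun h => hne h.symm),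
        ← List.getD_eq_getElem?_getD]
    · rfl

lemma dead_not_cond (g : List (List Int)) (v : List (List Bool)) (row col p dr dc : Int)
    (hw : pvWrapOk v row col)
    (hd : (0 ≤ row + dr ∧ row + dr < 10 ∧ 0 ≤ col + dc ∧ col + dc < 10) →
      ((row + dr).toNat = pvIdx v.length row ∧
        (col + dc).toNat = pvIdx (v.getD (pvIdx v.length row) []).length col) ∨
      ((row + dr).toNat < v.length ∧
        (col + dc).toNat < (v.getD (row + dr).toNat []).length ∧
        ((v.getD (row + dr).toNat []).getD (col + dc).toNat false = true ∨
          ((row + dr).toNat < g.length ∧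
            (col + dc).toNat < (g.getD (row + dr).toNat []).length ∧
            (g.getD (row + dr).toNat []).getD (col + dc).toNat 0 ≠ p)))) :
    ¬ (0 ≤ row+dr ∧ row+dr < 10 ∧ 0 ≤ col+dc ∧ col+dc < 10 ∧
       pvGetB (pvMark v row col) (row+dr) (col+dc) = false ∧ pvGetI g (row+dr) (col+dc) = p) := by
  rintro ⟨h1, h2, h3, h4, h5, h6⟩
  rcases hd ⟨h1, h2, h3, h4⟩ with ⟨hr, hc⟩ | ⟨hv1, hv2, hvis | ⟨hg1, hg2, hgne⟩⟩
  · rw [pvGetB_mark_eq v row col hw _ _ h1 h3 hr hc] at h5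
    exact absurd h5 (by simp)
  · by_cases heq : (row + dr).toNat = pvIdx v.length row ∧
      (col + dc).toNat = pvIdx (v.getD (pvIdx v.length row) []).length col
    · rw [pvGetB_mark_eq v row col hw _ _ h1 h3 heq.1 heq.2] at h5
      exact absurd h5 (by simp)
    · rw [pvGetB_mark_ne v row col _ _ h1 h3 (by tauto),
        pvGetB_eq_getD _ _ _ h1 h3, hvis] at h5
      exact absurd h5 (by simp)
  · rw [pvGetI_eq_getD _ _ _ h1 h3] at h6
    exact hgne h6

lemma dead_conds (g : List (List Int)) (v : List (List Bool)) (row col p : Int)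
    (hw : pvWrapOk v row col) (hdead : pvDead g v row col p) :
    (¬ (0 ≤ row+0 ∧ row+0 < 10 ∧ 0 ≤ col+1 ∧ col+1 < 10 ∧
       pvGetB (pvMark v row col) (row+0) (col+1) = false ∧ pvGetI g (row+0) (col+1) = p)) ∧
    (¬ (0 ≤ row+0 ∧ row+0 < 10 ∧ 0 ≤ col+(-1) ∧ col+(-1) < 10 ∧
       pvGetB (pvMark v row col) (row+0) (col+(-1)) = false ∧ pvGetI g (row+0) (col+(-1)) = p)) ∧
    (¬ (0 ≤ row+1 ∧ row+1 < 10 ∧ 0 ≤ col+0 ∧ col+0 < 10 ∧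
       pvGetB (pvMark v row col) (row+1) (col+0) = false ∧ pvGetI g (row+1) (col+0) = p)) ∧
    (¬ (0 ≤ row+(-1) ∧ row+(-1) < 10 ∧ 0 ≤ col+0 ∧ col+0 < 10 ∧
       pvGetB (pvMark v row col) (row+(-1)) (col+0) = false ∧ pvGetI g (row+(-1)) (col+0) = p)) :=
  ⟨dead_not_cond g v row col p 0 1 hw (hdead (0,1) (by simp)),
   dead_not_cond g v row col p 0 (-1) hw (hdead (0,-1) (by simp)),
   dead_not_cond g v row col p 1 0 hw (hdead (1,0) (by simp)),
   dead_not_cond g v row col p (-1) 0 hw (hdead (-1,0) (by simp))⟩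

lemma dfsA_dead (g : List (List Int)) (p : Int) (f : Nat) (v : List (List Bool)) (row col : Int)
    (h9 : ¬ row = 9) (hw : pvWrapOk v row col) (hdead : pvDead g v row col p) :
    dfsA g p (f+1) v row col = some (false, pvMark v row col) := by
  obtain ⟨c1, c2, c3, c4⟩ := dead_conds g v row col p hw hdead
  rw [dfsA, if_neg h9, goA, if_neg c1, goA, if_neg c2, goA, if_neg c3, goA, if_neg c4, goA]

lemma runB_dead (g : List (List Int)) (p : Int) (f : Nat) (v : List (List Bool)) (row col : Int)
    (h9 : ¬ row = 9) (hw : pvWrapOk v row col) (hdead : pvDead g v row col p) :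
    runB g p (f+8) [(row, col, none)] v = some false := by
  obtain ⟨c1, c2, c3, c4⟩ := dead_conds g v row col p hw hdead
  have hf : f + 8 = (((((((f+1)+1)+1)+1)+1)+1)+1)+1 := by omega
  rw [hf, runB, if_neg h9,
      runB, if_neg c1, runB, if_neg c2, runB, if_neg c3, runB, if_neg c4,
      runB, runB]

-- ===== VERDICT (by name: the statement is the Claim_ definition above) =====
theorem dfs_vertical_spec : Claim_equal_dfs_vertical := by
  intro grid visited row col player _ hpre
  unfold Spec_dfs_vertical
  rcases hpre with h9 | ⟨hg1, hg2, hv1, hv2, h1, h2, h3, h4⟩ | ⟨h9, hw, hdead⟩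
  · subst h9
    have hA : dfsA grid player 250 visited 9 col = some (true, visited) := by
      rw [show (250:Nat) = 249+1 from rfl, dfsA]; simp
    have hB : runB grid player pvFuelB [(9, col, none)] visited = some true := by
      unfold pvFuelB
      rw [runB]
      simp
    unfold dfs_vertical dfs_vertical_alt
    rw [hA, hB]
  · have hs : pvShape10 visited := ⟨hv1, hv2⟩
    have hne := dfsA_ne_none grid player visited row col hs
    cases hA : dfsA grid player 250 visited row col with
    | none => exact absurd hA hne
    | some x =>
      obtain ⟨b, v'⟩ := x
      have hsim := simD_all grid player 250 visited row col b v' hA [] 1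
      cases b with
      | true =>
        have hB : runB grid player pvFuelB [(row, col, none)] visited = some true :=
          hsim.1 rfl
        unfold dfs_vertical dfs_vertical_alt
        rw [hA, hB]
      | false =>
        have hres : runB grid player (0+1) [] v' = some false := by rw [runB]
        have hB : runB grid player pvFuelB [(row, col, none)] visited = some false :=
          hsim.2 rfl false hres
        unfold dfs_vertical dfs_vertical_alt
        rw [hA, hB]
  · have hA : dfsA grid player 250 visited row col = some (false, pvMark visited row col) := by
      rw [show (250:Nat) = 249+1 from rfl]
      exact dfsA_dead grid player 249 visited row col h9 hw hdead
    have hB : runB grid player pvFuelB [(row, col, none)] visited = some false := by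
      obtain ⟨m, hm⟩ : ∃ m, pvFuelB = m + 8 := by
        refine ⟨pvCostD 250 - 7, ?_⟩
        have h6 : pvCostD 250 = 4 * pvCostD 249 + 6 := by
          rw [show (250:Nat) = 249+1 from rfl, pvCostD]
        have h7 : pvCostD 249 = 4 * pvCostD 248 + 6 := by
          rw [show (249:Nat) = 248+1 from rfl, pvCostD]
        unfold pvFuelB
        omega
      rw [hm]
      exact runB_dead grid player m visited row col h9 hw hdead
    unfold dfs_vertical dfs_vertical_alt
    rw [hA, hB]
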